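-- pv_equiv track=rewrite | github.com/Maica08/BooleanExpParser | modules/trial3.py | split_by_outermost_operator
-- ===== SOURCE A (Python) =====
-- def split_by_outermost_operator(expression, operator):
--     paren_count = 0
--     current_expression = ""
--     split_expressions = []
--
--     for char in expression:
--         if char == '(':
--             paren_count += 1
--         elif char == ')':
--             paren_count -= 1
--
--         if paren_count == 0 and char == operator:
--             split_expressions.append(current_expression)
--             current_expression = ""
--         else:
--             current_expression += char
--
--     split_expressions.append(current_expression)
--
--     return split_expressions
-- ===== SOURCE B (Python) =====
-- def split_by_outermost_operator(expression, operator):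
--     # Pass 1: record the indices where the split fires (depth updated before the test).
--     depth = 0
--     cuts = []
--     for i, ch in enumerate(expression):
--         if ch == '(':
--             depth += 1
--         elif ch == ')':
--             depth -= 1
--         if depth == 0 and ch == operator:
--             cuts.append(i)
--     # Pass 2: build the result by slicing the original string at the cut positions.
--     parts = []
--     prev = 0
--     for i in cuts:
--         parts.append(expression[prev:i])
--         prev = i + 1
--     parts.append(expression[prev:])
--     return parts
-- ===== Notes on version B (the rewrite author's own statement) =====
-- stated objective: alternative
-- what changed: B replaces A's single loop that grows the current segment one character at a time with a two-pass scheme: first collect the outermost-level cut indices, then build the result by slicing the original string between consecutive cuts.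
import Mathlib
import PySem

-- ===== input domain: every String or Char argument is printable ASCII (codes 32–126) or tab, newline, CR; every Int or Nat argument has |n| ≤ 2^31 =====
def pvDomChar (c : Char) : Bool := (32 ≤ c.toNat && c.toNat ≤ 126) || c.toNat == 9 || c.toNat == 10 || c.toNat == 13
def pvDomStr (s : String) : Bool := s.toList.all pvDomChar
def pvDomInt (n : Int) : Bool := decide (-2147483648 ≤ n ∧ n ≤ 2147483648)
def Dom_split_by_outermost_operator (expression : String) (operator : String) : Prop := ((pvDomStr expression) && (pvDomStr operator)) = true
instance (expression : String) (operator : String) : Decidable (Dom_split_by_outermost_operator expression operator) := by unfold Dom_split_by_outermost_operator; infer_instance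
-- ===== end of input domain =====

-- B builds the result from recorded cut indices by slicing instead of growing the
-- current segment character by character (alternative decomposition, same exact values).

-- ===== PORT A =====
-- A's loop: depth update first, then test; the current segment and the output list
-- are threaded as accumulators, and the final segment is appended at the end.
def goA (op : List Char) : List Char → Int → List Char → List (List Char) → List (List Char)
  | [], _, cur, acc => acc ++ [cur]
  | c :: cs, d, cur, acc =>
    let d' := if c = '(' then d + 1 else if c = ')' then d - 1 else d
    if d' = 0 ∧ [c] = op then goA op cs d' [] (acc ++ [cur])
    else goA op cs d' (cur ++ [c]) acc

def split_by_outermost_operator (expression : String) (operator : String) : List String :=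
  (goA operator.toList expression.toList 0 [] []).map String.mk

-- ===== PORT B =====
-- enumerate(expression) with running index
def enumFrom : Nat → List Char → List (Nat × Char)
  | _, [] => []
  | n, c :: cs => (n, c) :: enumFrom (n + 1) cs

-- B's first pass: collect the indices where the split fires.
def goCuts (op : List Char) : List (Nat × Char) → Int → List Nat → List Nat
  | [], _, cuts => cuts
  | (i, c) :: rest, d, cuts =>
    let d' := if c = '(' then d + 1 else if c = ')' then d - 1 else d
    if d' = 0 ∧ [c] = op then goCuts op rest d' (cuts ++ [i])
    else goCuts op rest d' cuts

-- B's second pass: expression[prev:i] for each cut i, then expression[prev:].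
-- The slice is ported as (drop prev).take (i - prev), exact for 0 ≤ prev ≤ i ≤ len,
-- which holds for every state this pass reaches (cut indices are increasing positions).
def goParts : List Nat → Nat → List Char → List (List Char)
  | [], prev, cs => [cs.drop prev]
  | i :: is, prev, cs => (cs.drop prev).take (i - prev) :: goParts is (i + 1) cs

def split_by_outermost_operator_alt (expression : String) (operator : String) : List String :=
  (goParts (goCuts operator.toList (enumFrom 0 expression.toList) 0 []) 0 expression.toList).map String.mk

-- ===== PRECONDITION & SPEC =====
def Spec_split_by_outermost_operator (expression : String) (operator : String) (out : List String) : Prop := out = split_by_outermost_operator_alt expression operator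
instance (expression : String) (operator : String) (out : List String) : Decidable (Spec_split_by_outermost_operator expression operator out) := by unfold Spec_split_by_outermost_operator; infer_instance

-- ===== CLAIM (what is proved, stated in full; the proofs are below) =====
def Claim_equal_split_by_outermost_operator : Prop := ∀ (expression : String) (operator : String), Dom_split_by_outermost_operator expression operator → Spec_split_by_outermost_operator expression operator (split_by_outermost_operator expression operator)

-- ===== LEMMAS AND PROOFS =====

-- prepend cur to the first segment of a segment list
def consHead (cur : List Char) : List (List Char) → List (List Char)
  | [] => [cur]
  | h :: t => (cur ++ h) :: t

-- reference splitter: pure structural recursion, no accumulators/indices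
def splitS (op : List Char) : List Char → Int → List (List Char)
  | [], _ => [[]]
  | c :: cs, d =>
    let d' := if c = '(' then d + 1 else if c = ')' then d - 1 else d
    if d' = 0 ∧ [c] = op then [] :: splitS op cs d'
    else consHead [c] (splitS op cs d')

theorem splitS_ne_nil (op : List Char) (cs : List Char) (d : Int) : splitS op cs d ≠ [] := by
  cases cs with
  | nil => simp [splitS]
  | cons c cs =>
    simp only [splitS]
    generalize (if c = '(' then d + 1 else if c = ')' then d - 1 else d) = d'
    split
    · simp
    · cases splitS op cs d' <;> simp [consHead]

theorem consHead_nil (l : List (List Char)) (h : l ≠ []) : consHead [] l = l := by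
  cases l with
  | nil => exact absurd rfl h
  | cons a t => simp [consHead]

theorem consHead_append (a b : List Char) (l : List (List Char)) :
    consHead (a ++ b) l = consHead a (consHead b l) := by
  cases l <;> simp [consHead]

theorem goA_eq_splitS (op : List Char) (cs : List Char) (d : Int) (cur : List Char)
    (acc : List (List Char)) : goA op cs d cur acc = acc ++ consHead cur (splitS op cs d) := by
  induction cs generalizing d cur acc with
  | nil => simp [goA, splitS, consHead]
  | cons c cs ih =>
    simp only [goA, splitS]
    generalize (if c = '(' then d + 1 else if c = ')' then d - 1 else d) = d'
    split
    · rw [ih, consHead_nil _ (splitS_ne_nil op cs d'), consHead]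
      simp
    · rw [ih, consHead_append]

-- pure form of B's first pass
def cutsPure (op : List Char) : List (Nat × Char) → Int → List Nat
  | [], _ => []
  | (i, c) :: rest, d =>
    let d' := if c = '(' then d + 1 else if c = ')' then d - 1 else d
    if d' = 0 ∧ [c] = op then i :: cutsPure op rest d'
    else cutsPure op rest d'

theorem goCuts_eq (op : List Char) (l : List (Nat × Char)) (d : Int) (cuts : List Nat) :
    goCuts op l d cuts = cuts ++ cutsPure op l d := by
  induction l generalizing d cuts with
  | nil => simp [goCuts, cutsPure]
  | cons p rest ih =>
    obtain ⟨i, c⟩ := p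
    simp only [goCuts, cutsPure]
    generalize (if c = '(' then d + 1 else if c = ')' then d - 1 else d) = d'
    split
    · rw [ih]; simp
    · rw [ih]

theorem cutsPure_ge (op : List Char) (cs : List Char) (n : Nat) (d : Int) :
    ∀ i ∈ cutsPure op (enumFrom n cs) d, n ≤ i := by
  induction cs generalizing n d with
  | nil => simp [enumFrom, cutsPure]
  | cons c cs ih =>
    intro i hi
    simp only [enumFrom, cutsPure] at hi
    generalize (if c = '(' then d + 1 else if c = ')' then d - 1 else d) = d' at hi
    split at hi
    · rcases List.mem_cons.mp hi with h | h
      · omega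
      · have := ih (n + 1) d' i h; omega
    · have := ih (n + 1) d' i hi; omega

theorem goParts_eq_splitS (op : List Char) (cs : List Char) (d : Int) (n : Nat)
    (full : List Char) (hfull : full.drop n = cs) :
    goParts (cutsPure op (enumFrom n cs) d) n full = splitS op cs d := by
  induction cs generalizing d n with
  | nil => simp [enumFrom, cutsPure, goParts, splitS, hfull]
  | cons c cs ih =>
    have hdrop : full.drop (n + 1) = cs := by
      have : full.drop (n + 1) = (full.drop n).drop 1 := by
        rw [List.drop_drop]
      rw [this, hfull]; rfl
    simp only [enumFrom, cutsPure, splitS]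
    generalize (if c = '(' then d + 1 else if c = ')' then d - 1 else d) = d'
    split
    · simp only [goParts]
      rw [ih d' _ hdrop, hfull]
      simp
    · rw [← ih d' (n + 1) hdrop]
      cases hc : cutsPure op (enumFrom (n + 1) cs) d' with
      | nil => simp [goParts, consHead, hfull, hdrop]
      | cons i is =>
        have hni : n + 1 ≤ i := cutsPure_ge op cs (n + 1) d' i (by rw [hc]; exact List.mem_cons_self ..)
        simp only [goParts, consHead]
        congr 1
        have h1 : i - n = (i - (n + 1)) + 1 := by omega
        rw [hfull, hdrop, h1, List.take_succ_cons]
        rfl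

-- ===== VERDICT (by name: the statement is the Claim_ definition above) =====
theorem split_by_outermost_operator_spec : Claim_equal_split_by_outermost_operator := by
  intro expression operator _
  unfold Spec_split_by_outermost_operator split_by_outermost_operator split_by_outermost_operator_alt
  rw [goA_eq_splitS, goCuts_eq]
  simp only [List.nil_append]
  rw [
    goParts_eq_splitS operator.toList expression.toList 0 0 expression.toList (by simp),
    consHead_nil _ (splitS_ne_nil operator.toList expression.toList 0)]
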